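-- pv_equiv track=rewrite | github.com/bencartford/debrewin | setup_etc.py | shift_the_sequence
-- ===== SOURCE A (Python) =====
-- def shift_the_sequence(seq):
--     shifted_seq_array = [None]*len(seq)
--     for i in range(len(seq)):
--         if i == len(seq)-1:
--             shifted_seq_array[0] = seq[i]
--         else:
--             shifted_seq_array[i+1] = seq[i]
--     shifted_seq_string = ''.join(shifted_seq_array)
--     return shifted_seq_string
-- ===== SOURCE B (Python) =====
-- def shift_the_sequence(seq):
--     return ''.join(seq[-1:] + seq[:-1])
-- ===== Notes on version B (the rewrite author's own statement) =====
-- stated objective: idiomatic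
-- what changed: Replaces the None-filled array and index-by-index placement loop with a single slice concatenation seq[-1:] + seq[:-1] joined into a string.
import Mathlib
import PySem

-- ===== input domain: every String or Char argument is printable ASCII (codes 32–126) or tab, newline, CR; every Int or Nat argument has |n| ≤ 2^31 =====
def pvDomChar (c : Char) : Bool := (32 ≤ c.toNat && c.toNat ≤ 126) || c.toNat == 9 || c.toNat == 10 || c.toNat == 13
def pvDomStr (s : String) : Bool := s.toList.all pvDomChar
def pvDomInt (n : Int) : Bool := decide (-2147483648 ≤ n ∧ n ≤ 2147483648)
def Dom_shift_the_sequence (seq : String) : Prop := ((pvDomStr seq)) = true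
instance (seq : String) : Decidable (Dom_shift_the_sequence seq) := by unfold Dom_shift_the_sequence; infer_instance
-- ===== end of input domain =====

-- B replaces A's None-filled array and index placement loop by a closed slice
-- concatenation seq[-1:] + seq[:-1]; same cost, plainer code.

-- ===== PORT A =====
-- literal port of A: build an Option-filled array, place each seq[i] at its
-- shifted slot by a loop over range(len(seq)), then join.  The final
-- '.getD ' '' in the join is exact: the loop fills every slot, so no slot is
-- none when the join runs (Python's join would raise on None, unreachable).
def shift_the_sequence (seq : String) : String :=
  let l : List Char := seq.toList
  let n : Int := (l.length : Int)
  let arr0 : List (Option Char) := List.replicate l.length none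
  let arr := (PySem.List.pyRange 0 n 1).foldl (fun a i =>
      if i = n - 1 then PySem.List.pySetD a 0 (PySem.List.pyGet? l i)
      else PySem.List.pySetD a (i + 1) (PySem.List.pyGet? l i)) arr0
  String.ofList (arr.map (fun o => o.getD ' '))

-- ===== PORT B =====
-- literal port of B: ''.join(seq[-1:] + seq[:-1])
def shift_the_sequence_alt (seq : String) : String :=
  let l : List Char := seq.toList
  String.ofList (PySem.List.slice l (some (-1)) none ++ PySem.List.slice l none (some (-1)))

-- ===== PRECONDITION & SPEC =====
def Spec_shift_the_sequence (seq : String) (out : String) : Prop := out = shift_the_sequence_alt seq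
instance (seq : String) (out : String) : Decidable (Spec_shift_the_sequence seq out) := by unfold Spec_shift_the_sequence; infer_instance

-- ===== CLAIM (what is proved, stated in full; the proofs are below) =====
def Claim_equal_shift_the_sequence : Prop := ∀ (seq : String), Dom_shift_the_sequence seq → Spec_shift_the_sequence seq (shift_the_sequence seq)

-- ===== LEMMAS AND PROOFS =====

-- setting the slot right after a prefix of filled slots
theorem pvSetMid (X R : List (Option Char)) (v : Option Char) :
    (none :: (X ++ none :: R)).set (X.length + 1) v = none :: ((X ++ [v]) ++ R) := by
  simp

-- prefix phase of A's loop: after processing indices 0..m-1 (all taking the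
-- else branch), slot 0 is untouched and slots 1..m hold seq[0..m-1].
theorem pvA_prefix (l : List Char) (m : Nat) (hm : m + 1 ≤ l.length) :
    (PySem.List.pyRange 0 (m : Int) 1).foldl (fun a i =>
        PySem.List.pySetD a (i + 1) (PySem.List.pyGet? l i))
      (List.replicate l.length (none : Option Char))
    = none :: (l.take m).map some ++ List.replicate (l.length - 1 - m) none := by
  induction m with
  | zero =>
      simp
      cases l with
      | nil => simp at hm
      | cons c t => simp [List.replicate_succ]
  | succ m ih =>
      have hm' : m + 1 ≤ l.length := by omega
      have hsplit : PySem.List.pyRange 0 ((m : Int) + 1) 1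
          = PySem.List.pyRange 0 (m : Int) 1 ++ [(m : Int)] := by
        exact_mod_cast PySem.List.pyRange_one_succ_right (a := 0) (b := (m : Int)) (by positivity)
      push_cast
      rw [hsplit, List.foldl_append, ih hm', List.foldl_cons, List.foldl_nil]
      have hget : PySem.List.pyGet? l (m : Int) = some (l[m]'(by omega)) := by
        simp [List.getElem?_eq_getElem (by omega : m < l.length)]
      have hcast : ((m : Int) + 1) = ((m + 1 : Nat) : Int) := by push_cast; ring
      rw [hcast, PySem.List.pySetD_natCast, hget]
      have hrep : l.length - 1 - m = (l.length - 1 - (m + 1)) + 1 := by omega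
      rw [hrep, List.replicate_succ]
      have hx : (List.map some (List.take m l)).length = m := by simp; omega
      have hmid := pvSetMid (List.map some (List.take m l))
        (List.replicate (l.length - 1 - (m + 1)) (none : Option Char)) (some (l[m]'(by omega)))
      rw [hx] at hmid
      have htake : List.take (m + 1) (List.map some l)
          = List.take m (List.map some l) ++ [some (l[m]'(by omega))] := by
        rw [List.take_add_one]
        simp [List.getElem?_eq_getElem (by omega : m < l.length)]
      exact hmid.trans (by simp [htake])

theorem shift_the_sequence_eq (seq : String) :
    shift_the_sequence seq = shift_the_sequence_alt seq := by
  unfold shift_the_sequence shift_the_sequence_alt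
  cases hl : seq.toList with
  | nil => simp [PySem.List.slice]
  | cons c t =>
    dsimp only
    set l : List Char := c :: t with hldef
    have hn : 0 < l.length := by simp [hldef]
    -- split the range at its last index
    have hsplit : PySem.List.pyRange 0 (l.length : Int) 1
        = PySem.List.pyRange 0 ((l.length : Int) - 1) 1 ++ [(l.length : Int) - 1] := by
      have := PySem.List.pyRange_one_succ_right (a := 0) (b := (l.length : Int) - 1)
        (by omega)
      simpa using this
    
    rw [hsplit, List.foldl_append]
    -- the prefix never hits the special branch
    have hcongr : (PySem.List.pyRange 0 ((l.length : Int) - 1) 1).foldl (fun a i =>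
          if i = (l.length : Int) - 1 then PySem.List.pySetD a 0 (PySem.List.pyGet? l i)
          else PySem.List.pySetD a (i + 1) (PySem.List.pyGet? l i))
        (List.replicate l.length none)
        = (PySem.List.pyRange 0 ((l.length : Int) - 1) 1).foldl (fun a i =>
          PySem.List.pySetD a (i + 1) (PySem.List.pyGet? l i))
        (List.replicate l.length none) := by
      apply PySem.List.foldl_congr_mem
      intro a i hi
      have := (PySem.List.mem_pyRange_one (a := 0) (b := (l.length : Int) - 1) (x := i)).1 hi
      rw [if_neg (by omega)]
    rw [hcongr]
    have hm1 : (l.length - 1) + 1 ≤ l.length := by omega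
    have hcast : ((l.length : Int) - 1) = ((l.length - 1 : Nat) : Int) := by omega
    rw [hcast, pvA_prefix l (l.length - 1) hm1]
    -- last iteration: sets slot 0 to the last element
    rw [List.foldl_cons, List.foldl_nil, if_pos rfl]
    have hlast : PySem.List.pyGet? l ((l.length - 1 : Nat) : Int)
        = some (l[l.length - 1]'(by omega)) := by
      simp [List.getElem?_eq_getElem (by omega : l.length - 1 < l.length)]
    rw [hlast]
    -- B's slices
    rw [PySem.List.slice_from_neg_one, PySem.List.slice_to_neg_one]
    have hdrop : l.drop (l.length - 1) = [l[l.length - 1]'(by omega)] := by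
      rw [List.drop_eq_getElem_cons (by omega : l.length - 1 < l.length),
        show l.length - 1 + 1 = l.length from by omega, List.drop_length]
    have hdl : l.dropLast = l.take (l.length - 1) := by
      rw [List.dropLast_eq_take]
    rw [hdrop, hdl]
    simp [PySem.List.pySetD, PySem.List.pySet?, PySem.List.pyIdx?]

-- ===== VERDICT (by name: the statement is the Claim_ definition above) =====
theorem shift_the_sequence_spec : Claim_equal_shift_the_sequence := by
  intro seq _
  unfold Spec_shift_the_sequence
  exact shift_the_sequence_eq seq
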